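-- pv_equiv track=rewrite | github.com/Xianith/WebLoadouts | scrape_builds.py | guess_content_type
-- ===== SOURCE A (Python) =====
-- def guess_content_type(name):
--     """Guess content type from build name."""
--     name_lower = name.lower()
--     # Wowhead uses "Raid ST", "ST Raid", "Raid MT", "MT Raid", "Multitarget"
--     if any(kw in name_lower for kw in ["raid", "single target", "single-target", " st", "st ",
--                                          "multitarget", "multi-target", " mt", "mt "]):
--         return "raid"
--     if any(kw in name_lower for kw in ["mythic", "m+", "aoe", "dungeon", "keys"]):
--         return "mythicplus"
--     if any(kw in name_lower for kw in ["pvp", "arena", "battleground", "bg"]):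
--         return "pvp"
--     if any(kw in name_lower for kw in ["level", "leveling"]):
--         return "leveling"
--     if any(kw in name_lower for kw in ["delve", "delving", "open world"]):
--         return "delves"
--     return "general"
-- ===== SOURCE B (Python) =====
-- # Flat keyword -> priority-rank map; lowest matching rank wins (ties broken by rank, not scan order).
-- KEYWORD_RANK = {
--     "raid": 0, "single target": 0, "single-target": 0, " st": 0, "st ": 0,
--     "multitarget": 0, "multi-target": 0, " mt": 0, "mt ": 0,
--     "mythic": 1, "m+": 1, "aoe": 1, "dungeon": 1, "keys": 1,
--     "pvp": 2, "arena": 2, "battleground": 2, "bg": 2,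
--     "level": 3, "leveling": 3,
--     "delve": 4, "delving": 4, "open world": 4,
-- }
-- CATEGORIES = ["raid", "mythicplus", "pvp", "leveling", "delves", "general"]
--
-- def guess_content_type(name):
--     """Guess content type: minimum priority rank over all matching keywords."""
--     low = name.lower()
--     best = min((rank for kw, rank in KEYWORD_RANK.items() if kw in low),
--                default=len(CATEGORIES) - 1)
--     return CATEGORIES[best]
-- ===== Notes on version B (the rewrite author's own statement) =====
-- stated objective: alternative
-- what changed: Replaces the early-return chain of five grouped any() branches with a flat keyword->priority-rank map: B scans all keywords once, takes the minimum matching rank (default = rank of 'general') and indexes a category array with it.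
import Mathlib
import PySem

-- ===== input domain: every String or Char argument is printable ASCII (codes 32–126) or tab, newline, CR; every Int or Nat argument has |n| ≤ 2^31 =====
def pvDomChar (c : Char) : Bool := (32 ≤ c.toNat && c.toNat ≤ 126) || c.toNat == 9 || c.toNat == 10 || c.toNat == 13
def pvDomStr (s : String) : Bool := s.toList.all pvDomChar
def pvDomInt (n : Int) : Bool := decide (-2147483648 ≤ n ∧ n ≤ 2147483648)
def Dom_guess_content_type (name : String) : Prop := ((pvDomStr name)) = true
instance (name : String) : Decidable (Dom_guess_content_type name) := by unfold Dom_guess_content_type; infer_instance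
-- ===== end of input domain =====

-- B replaces the early-return branch chain by a flat keyword->rank map: minimum matching rank selects the category (alternative; same cost).

-- ===== PORT A =====
def guess_content_type (name : String) : String :=
  let name_lower := PySem.Str.lower name
  if ([ "raid", "single target", "single-target", " st", "st ",
        "multitarget", "multi-target", " mt", "mt " ].any
        (fun kw => PySem.Str.isIn kw name_lower)) then "raid"
  else if (["mythic", "m+", "aoe", "dungeon", "keys"].any
        (fun kw => PySem.Str.isIn kw name_lower)) then "mythicplus"
  else if (["pvp", "arena", "battleground", "bg"].any
        (fun kw => PySem.Str.isIn kw name_lower)) then "pvp"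
  else if (["level", "leveling"].any
        (fun kw => PySem.Str.isIn kw name_lower)) then "leveling"
  else if (["delve", "delving", "open world"].any
        (fun kw => PySem.Str.isIn kw name_lower)) then "delves"
  else "general"

-- ===== PORT B =====
def pvKeywordRank : List (String × Nat) :=
  [ ("raid", 0), ("single target", 0), ("single-target", 0), (" st", 0), ("st ", 0),
    ("multitarget", 0), ("multi-target", 0), (" mt", 0), ("mt ", 0),
    ("mythic", 1), ("m+", 1), ("aoe", 1), ("dungeon", 1), ("keys", 1),
    ("pvp", 2), ("arena", 2), ("battleground", 2), ("bg", 2),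
    ("level", 3), ("leveling", 3),
    ("delve", 4), ("delving", 4), ("open world", 4) ]

def pvCategories : List String :=
  ["raid", "mythicplus", "pvp", "leveling", "delves", "general"]

def guess_content_type_alt (name : String) : String :=
  let low := PySem.Str.lower name
  let best := pvKeywordRank.foldl
    (fun acc kr => if PySem.Str.isIn kr.1 low then min acc kr.2 else acc)
    (pvCategories.length - 1)
  -- CATEGORIES[best]: 0 ≤ best ≤ 5 always, so the index is in range; getD's default is never reached
  pvCategories.getD best ""

-- ===== PRECONDITION & SPEC =====
def Spec_guess_content_type (name : String) (out : String) : Prop := out = guess_content_type_alt name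
instance (name : String) (out : String) : Decidable (Spec_guess_content_type name out) := by unfold Spec_guess_content_type; infer_instance

-- ===== CLAIM (what is proved, stated in full; the proofs are below) =====
def Claim_equal_guess_content_type : Prop := ∀ (name : String), Dom_guess_content_type name → Spec_guess_content_type name (guess_content_type name)

-- ===== LEMMAS AND PROOFS =====

-- folding the min-step over a block of keywords that all carry the same rank r
theorem pv_scan_group (low : String) (r : Nat) (kws : List String) (acc : Nat) :
    (kws.map (fun kw => (kw, r))).foldl
      (fun acc kr => if PySem.Str.isIn kr.1 low then min acc kr.2 else acc) acc
    = if kws.any (fun kw => PySem.Str.isIn kw low) then min acc r else acc := by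
  induction kws generalizing acc with
  | nil => simp
  | cons k t ih =>
    simp only [List.map_cons, List.foldl_cons, List.any_cons, ih]
    rcases Bool.dichotomy (PySem.Str.isIn k low) with h | h <;>
      rcases Bool.dichotomy (t.any (fun kw => PySem.Str.isIn kw low)) with h2 | h2 <;>
        simp only [h, h2] <;> simp

-- ===== VERDICT (by name: the statement is the Claim_ definition above) =====
theorem guess_content_type_spec : Claim_equal_guess_content_type := by
  intro name _
  unfold Spec_guess_content_type guess_content_type guess_content_type_alt
  have hflat : pvKeywordRank =
      (([ "raid", "single target", "single-target", " st", "st ",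
          "multitarget", "multi-target", " mt", "mt " ].map (fun kw => (kw, (0:Nat))))
       ++ (["mythic", "m+", "aoe", "dungeon", "keys"].map (fun kw => (kw, (1:Nat))))
       ++ (["pvp", "arena", "battleground", "bg"].map (fun kw => (kw, (2:Nat))))
       ++ (["level", "leveling"].map (fun kw => (kw, (3:Nat))))
       ++ (["delve", "delving", "open world"].map (fun kw => (kw, (4:Nat))))) := rfl
  rw [hflat]
  simp only [List.foldl_append, pv_scan_group]
  cases h0 : ([ "raid", "single target", "single-target", " st", "st ",
        "multitarget", "multi-target", " mt", "mt " ].any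
        (fun kw => PySem.Str.isIn kw (PySem.Str.lower name))) <;>
  cases h1 : (["mythic", "m+", "aoe", "dungeon", "keys"].any
        (fun kw => PySem.Str.isIn kw (PySem.Str.lower name))) <;>
  cases h2 : (["pvp", "arena", "battleground", "bg"].any
        (fun kw => PySem.Str.isIn kw (PySem.Str.lower name))) <;>
  cases h3 : (["level", "leveling"].any
        (fun kw => PySem.Str.isIn kw (PySem.Str.lower name))) <;>
  cases h4 : (["delve", "delving", "open world"].any
        (fun kw => PySem.Str.isIn kw (PySem.Str.lower name))) <;>
  (try simp only [h0, h1, h2, h3, h4]) <;> decide
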